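-- pv_equiv track=rewrite | github.com/Binzify/algorithm | KAKAO/1차_비밀지도/비밀지도.py | solution
-- ===== SOURCE A (Python) =====
-- def solution(n, arr1, arr2):
--     answer = []
--     # n x n 배열의 지도이므로
--     for i in range(n):  # 행 표시할 range
--         secret_map = ''  # 두 지도를 동시에 합치는 방식 / 한 줄 채우고 초기화
--         for j in range(n): # 열 표시
--             if arr1[i] & (1 << j) | arr2[i] & (1 << j):  # 해당 배열에서 꺼낸 숫자와 j번째의 비트가 1인지 확인하기
--                 # 9 가 1001 이고 30이 11110 인데 이 두 개를 한번에 확인하여 벽을 표시해준다.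
--                 secret_map += '#'  # 1이 있으면 벽이므로
--             else:
--                 secret_map += ' '  # 0 이면 공백
--         # 두번째 for 문이 다 돌면 정답 리스트에 넣어주기
--         # 그대로 넣어주면 결과값이 반대로 나와서 역방향으로 넣어주기 (첨부터 저장할 때 방법이없나?)
--         answer.append(secret_map[::-1])
--     return answer
-- ===== SOURCE B (Python) =====
-- _TABLE = str.maketrans('01', ' #')
--
-- def solution(n, arr1, arr2):
--     answer = []
--     for i in range(n):
--         row = (arr1[i] | arr2[i]) & ((1 << n) - 1)
--         answer.append(format(row, 'b').zfill(n).translate(_TABLE))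
--     return answer
-- ===== Notes on version B (the rewrite author's own statement) =====
-- stated objective: faster
-- what changed: Replaces the per-column bit-test loop that builds each row character by character and then reverses it with one integer OR per row, masked to the low n bits, rendered MSB-first in one shot by format(row,'b').zfill(n) and mapped to '#'/' ' via str.translate.
import Mathlib
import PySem

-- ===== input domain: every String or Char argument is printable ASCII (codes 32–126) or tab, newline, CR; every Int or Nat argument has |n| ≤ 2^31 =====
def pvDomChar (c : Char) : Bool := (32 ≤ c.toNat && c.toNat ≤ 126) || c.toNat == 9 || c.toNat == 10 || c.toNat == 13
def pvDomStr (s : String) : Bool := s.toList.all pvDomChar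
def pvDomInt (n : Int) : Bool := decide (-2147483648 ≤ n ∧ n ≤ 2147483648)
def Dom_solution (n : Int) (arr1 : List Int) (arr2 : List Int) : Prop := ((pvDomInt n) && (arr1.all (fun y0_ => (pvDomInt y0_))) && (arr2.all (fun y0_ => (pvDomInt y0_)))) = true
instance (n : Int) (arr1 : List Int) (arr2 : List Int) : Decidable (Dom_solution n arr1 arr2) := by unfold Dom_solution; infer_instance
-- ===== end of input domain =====

-- B replaces A's per-column bit-test loop (plus final string reversal) by one integer
-- OR per row, masked to the low n bits and rendered by binary formatting; measured faster.

-- ===== PORT A =====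
-- Literal port of A: for each i in range(n), build the row character by character,
-- testing arr1[i] & (1<<j) | arr2[i] & (1<<j) (truthiness: ≠ 0), then append the
-- reversed string (s[::-1] is List.reverse, cf. PySem.Str.slice?_none_none_neg_one).
-- Strings are built on the List Char side (exact; String.ofList at the append).
def solution (n : Int) (arr1 : List Int) (arr2 : List Int) : List String :=
  (PySem.List.pyRange 0 n 1).foldl (fun answer i =>
    let secret_map : List Char :=
      (PySem.List.pyRange 0 n 1).foldl (fun s j =>
        if PySem.Int.bor
             (PySem.Int.band (PySem.List.pyGetD arr1 i 0) ((1 : Int) <<< j.toNat))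
             (PySem.Int.band (PySem.List.pyGetD arr2 i 0) ((1 : Int) <<< j.toNat)) ≠ 0
        then s ++ ['#'] else s ++ [' ']) []
    answer ++ [String.ofList secret_map.reverse]) []

-- ===== PORT B =====
-- str.maketrans('01', ' #'): '0' ↦ ' ', '1' ↦ '#', everything else unchanged
def pyTrans (c : Char) : Char := if c = '0' then ' ' else if c = '1' then '#' else c

-- Literal port of B: row = (arr1[i] | arr2[i]) & ((1 << n) - 1);
-- format(row, 'b') is PySem.Int.toBinChars, then .zfill(n).translate(_TABLE).
def solution_alt (n : Int) (arr1 : List Int) (arr2 : List Int) : List String :=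
  (PySem.List.pyRange 0 n 1).foldl (fun answer i =>
    let row : Int :=
      PySem.Int.band
        (PySem.Int.bor (PySem.List.pyGetD arr1 i 0) (PySem.List.pyGetD arr2 i 0))
        (((1 : Int) <<< n.toNat) - 1)
    answer ++ [String.ofList ((PySem.Chars.zfill (PySem.Int.toBinChars row) n).map pyTrans)]) []

-- ===== PRECONDITION & SPEC =====
-- Pre_ excludes exactly the inputs where Python A raises IndexError: it reads
-- arr1[i] and arr2[i] for every i in range(n), so both lists need at least n rows.
def Pre_solution (n : Int) (arr1 : List Int) (arr2 : List Int) : Prop :=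
  n ≤ (arr1.length : Int) ∧ n ≤ (arr2.length : Int)
instance (n : Int) (arr1 : List Int) (arr2 : List Int) : Decidable (Pre_solution n arr1 arr2) := by unfold Pre_solution; infer_instance
def pvWitness_solution : Int × List Int × List Int := (2, ([9, 30], [30, 1]))

def Spec_solution (n : Int) (arr1 : List Int) (arr2 : List Int) (out : List String) : Prop := out = solution_alt n arr1 arr2
instance (n : Int) (arr1 : List Int) (arr2 : List Int) (out : List String) : Decidable (Spec_solution n arr1 arr2 out) := by unfold Spec_solution; infer_instance

-- ===== CLAIM (what is proved, stated in full; the proofs are below) =====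
def Claim_equal_solution : Prop := ∀ (n : Int) (arr1 : List Int) (arr2 : List Int), Dom_solution n arr1 arr2 → Pre_solution n arr1 arr2 → Spec_solution n arr1 arr2 (solution n arr1 arr2)

-- ===== LEMMAS AND PROOFS =====

-- folding `s ++ [f j]` is mapping
theorem pv_foldl_append_map {α β : Type} (l : List α) (s : List β) (f : α → β) :
    l.foldl (fun s j => s ++ [f j]) s = s ++ l.map f := by
  induction l generalizing s with
  | nil => simp
  | cons x xs ih => simp [List.foldl, ih]

-- A's inner loop: fold appending one of two characters is a map
theorem pv_foldl_if (l : List Int) (s : List Char) (p : Int → Prop) [DecidablePred p]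
    (x y : Char) :
    l.foldl (fun s j => if p j then s ++ [x] else s ++ [y]) s
      = s ++ l.map (fun j => if p j then x else y) := by
  have h : (fun (s : List Char) j => if p j then s ++ [x] else s ++ [y])
      = (fun (s : List Char) j => s ++ [if p j then x else y]) := by
    funext s j; split <;> rfl
  rw [h, pv_foldl_append_map]

-- naturals with no common bit add like they or
theorem pv_add_eq_or (a : Nat) : ∀ b : Nat, a &&& b = 0 → a + b = a ||| b := by
  induction a using Nat.strong_induction_on with
  | _ a ih =>
    intro b h
    rcases Nat.eq_zero_or_pos a with ha | ha
    · simp [ha]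
    · have h2 : a / 2 &&& b / 2 = 0 := by
        rw [← Nat.and_div_two, h]
      have ih2 := ih (a / 2) (Nat.div_lt_self ha (by omega)) (b / 2) h2
      have hor2 : (a ||| b) / 2 = a / 2 ||| b / 2 := Nat.or_div_two
      have hmod : ¬ (a % 2 = 1 ∧ b % 2 = 1) := by
        intro ⟨h1, h2'⟩
        have := Nat.and_mod_two_eq_one (a := a) (b := b)
        omega
      have hormod : (a ||| b) % 2 = 1 ↔ (a % 2 = 1 ∨ b % 2 = 1) := by
        have := Nat.or_mod_two_eq_one (a := a) (b := b)
        omega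
      omega

-- subtracting the overlap with a mask is bitwise difference
theorem pv_testBit_sub_and (k m j : Nat) :
    (k - (k &&& m)).testBit j = (k.testBit j && !(m.testBit j)) := by
  set s := k &&& m with hs
  set x := k ^^^ s with hx
  have hdisj : s &&& x = 0 := by
    apply Nat.eq_of_testBit_eq
    intro i
    simp only [Nat.testBit_and, Nat.testBit_xor, hx, hs, Nat.zero_testBit]
    cases k.testBit i <;> cases m.testBit i <;> rfl
  have hor : s ||| x = k := by
    apply Nat.eq_of_testBit_eq
    intro i
    simp only [Nat.testBit_or, Nat.testBit_xor, hx, hs, Nat.testBit_and]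
    cases k.testBit i <;> cases m.testBit i <;> rfl
  have hsum : s + x = k := by rw [pv_add_eq_or s x hdisj, hor]
  have hkx : k - s = x := by omega
  rw [hkx, hx, hs]
  simp only [Nat.testBit_xor, Nat.testBit_and]
  cases k.testBit j <;> cases m.testBit j <;> rfl

-- a & (1 << k) keeps exactly bit k (for any sign of x)
theorem pv_band_shift (x : Int) (k : Nat) :
    PySem.Int.band x ((1 : Int) <<< k) = ((if x.testBit k then 2 ^ k else 0 : Nat) : Int) := by
  have hsh : ((1 : Int) <<< k) = ((2 ^ k : Nat) : Int) := by
    rw [Int.shiftLeft_eq]; push_cast; ring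
  rw [hsh]
  cases x with
  | ofNat m =>
    rw [show ((Int.ofNat m) : Int) = ((m : Nat) : Int) from rfl, PySem.Int.band_natCast]
    rw [Nat.and_two_pow]
    rcases Bool.dichotomy (m.testBit k) with h | h <;> simp [Int.testBit, h]
  | negSucc m =>
    have h1 : ¬ (0 : Int) ≤ Int.negSucc m := by omega
    have h2 : (0 : Int) ≤ ((2 ^ k : Nat) : Int) := by positivity
    simp only [PySem.Int.band, h1, h2, if_true, if_false]
    have h3 : (-(Int.negSucc m) - 1).toNat = m := by
      rw [Int.neg_negSucc]; omega
    rw [h3]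
    have h4 : ((2 ^ k : Nat) : Int).toNat = 2 ^ k := by omega
    rw [h4, Nat.and_comm, Nat.and_two_pow]
    rcases Bool.dichotomy (m.testBit k) with h | h <;> simp [Int.testBit, h]

-- A's per-column test is a testBit of the OR of the two row values
theorem pv_cond_iff (a b : Int) (k : Nat) :
    (PySem.Int.bor (PySem.Int.band a ((1 : Int) <<< k)) (PySem.Int.band b ((1 : Int) <<< k)) ≠ 0)
      ↔ (a.testBit k || b.testBit k) = true := by
  rw [pv_band_shift, pv_band_shift, PySem.Int.bor_natCast]
  rcases Bool.dichotomy (a.testBit k) with ha | ha <;>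
    rcases Bool.dichotomy (b.testBit k) with hb | hb <;>
      simp [ha, hb, Nat.or_self, Nat.or_zero, Nat.zero_or]

-- band of a negative value with the nonnegative mask 2^N - 1
theorem pv_band_negSucc_mask (d N : Nat) :
    PySem.Int.band (Int.negSucc d) (((2 ^ N - 1 : Nat) : Int))
      = ((2 ^ N - (d % 2 ^ N + 1) : Nat) : Int) := by
  have h1 : ¬ (0 : Int) ≤ Int.negSucc d := by omega
  have h2 : (0 : Int) ≤ ((2 ^ N - 1 : Nat) : Int) := by positivity
  simp only [PySem.Int.band, h1, h2, if_true, if_false]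
  have h3 : (-(Int.negSucc d) - 1).toNat = d := by rw [Int.neg_negSucc]; omega
  have h4 : (((2 ^ N - 1 : Nat) : Int)).toNat = 2 ^ N - 1 := by omega
  rw [h3, h4, Nat.and_comm, Nat.and_two_pow_sub_one_eq_mod]
  congr 1
  have : d % 2 ^ N < 2 ^ N := Nat.mod_lt _ (by positivity)
  omega

theorem pv_mask_cast (N : Nat) : ((1 : Int) <<< N) - 1 = ((2 ^ N - 1 : Nat) : Int) := by
  rw [Int.shiftLeft_eq]
  have : (1 : Nat) ≤ 2 ^ N := Nat.one_le_two_pow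
  push_cast [this]
  ring

-- B's masked row value: a natural below 2^N whose low bits are the OR of the bits
theorem pv_row_mask (a b : Int) (N : Nat) :
    ∃ m : Nat, PySem.Int.band (PySem.Int.bor a b) (((1 : Int) <<< N) - 1) = (m : Int)
      ∧ m < 2 ^ N ∧ ∀ j, j < N → m.testBit j = (a.testBit j || b.testBit j) := by
  rw [pv_mask_cast]
  have hpos : 0 < 2 ^ N := by positivity
  cases a with
  | ofNat m =>
    cases b with
    | ofNat k =>
      refine ⟨(m ||| k) % 2 ^ N, ?_, Nat.mod_lt _ hpos, ?_⟩
      · rw [show ((Int.ofNat m : Int)) = ((m : Nat) : Int) from rfl,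
            show ((Int.ofNat k : Int)) = ((k : Nat) : Int) from rfl,
            PySem.Int.bor_natCast, PySem.Int.band_natCast, Nat.and_two_pow_sub_one_eq_mod]
      · intro j hj
        simp [Nat.testBit_mod_two_pow, hj, Nat.testBit_or, Int.testBit]
    | negSucc k =>
      have hbor : PySem.Int.bor (Int.ofNat m) (Int.negSucc k) = Int.negSucc (k - (k &&& m)) := by
        have h1 : (0 : Int) ≤ Int.ofNat m := Int.natCast_nonneg m
        have h2 : ¬ (0 : Int) ≤ Int.negSucc k := by omega
        simp only [PySem.Int.bor, h1, h2, if_true, if_false]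
        have h3 : (-(Int.negSucc k) - 1).toNat = k := by rw [Int.neg_negSucc]; omega
        have h4 : ((Int.ofNat m)).toNat = m := rfl
        rw [h3, h4, Int.negSucc_eq]
        ring
      rw [hbor, pv_band_negSucc_mask]
      set d := k - (k &&& m) with hd
      have hdm : d % 2 ^ N < 2 ^ N := Nat.mod_lt _ hpos
      refine ⟨2 ^ N - (d % 2 ^ N + 1), rfl, by omega, ?_⟩
      intro j hj
      rw [Nat.testBit_two_pow_sub_succ hdm, Nat.testBit_mod_two_pow]
      simp only [hj, decide_true, Bool.true_and, hd, pv_testBit_sub_and, Int.testBit]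
      cases m.testBit j <;> cases k.testBit j <;> rfl
  | negSucc m =>
    cases b with
    | ofNat k =>
      have hbor : PySem.Int.bor (Int.negSucc m) (Int.ofNat k) = Int.negSucc (m - (m &&& k)) := by
        have h1 : ¬ (0 : Int) ≤ Int.negSucc m := by omega
        have h2 : (0 : Int) ≤ Int.ofNat k := Int.natCast_nonneg k
        simp only [PySem.Int.bor, h1, h2, if_true, if_false]
        have h3 : (-(Int.negSucc m) - 1).toNat = m := by rw [Int.neg_negSucc]; omega
        have h4 : ((Int.ofNat k)).toNat = k := rfl
        rw [h3, h4, Int.negSucc_eq]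
        ring
      rw [hbor, pv_band_negSucc_mask]
      set d := m - (m &&& k) with hd
      have hdm : d % 2 ^ N < 2 ^ N := Nat.mod_lt _ hpos
      refine ⟨2 ^ N - (d % 2 ^ N + 1), rfl, by omega, ?_⟩
      intro j hj
      rw [Nat.testBit_two_pow_sub_succ hdm, Nat.testBit_mod_two_pow]
      simp only [hj, decide_true, Bool.true_and, hd, pv_testBit_sub_and, Int.testBit]
      cases m.testBit j <;> cases k.testBit j <;> rfl
    | negSucc k =>
      have hbor : PySem.Int.bor (Int.negSucc m) (Int.negSucc k) = Int.negSucc (m &&& k) := by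
        have h1 : ¬ (0 : Int) ≤ Int.negSucc m := by omega
        have h2 : ¬ (0 : Int) ≤ Int.negSucc k := by omega
        simp only [PySem.Int.bor, h1, h2, if_false]
        have h3 : (-(Int.negSucc m) - 1).toNat = m := by rw [Int.neg_negSucc]; omega
        have h4 : (-(Int.negSucc k) - 1).toNat = k := by rw [Int.neg_negSucc]; omega
        rw [h3, h4, Int.negSucc_eq]
        ring
      rw [hbor, pv_band_negSucc_mask]
      have hdm : (m &&& k) % 2 ^ N < 2 ^ N := Nat.mod_lt _ hpos
      refine ⟨2 ^ N - ((m &&& k) % 2 ^ N + 1), rfl, by omega, ?_⟩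
      intro j hj
      rw [Nat.testBit_two_pow_sub_succ hdm, Nat.testBit_mod_two_pow]
      simp only [hj, decide_true, Bool.true_and, Nat.testBit_and, Int.testBit]
      cases m.testBit j <;> cases k.testBit j <;> rfl

-- MSB-first binary digits: the recursion Nat.toDigitsCore performs for base 2
def pvBin : Nat → List Char
  | m => if m < 2 then [Nat.digitChar m]
         else pvBin (m / 2) ++ [Nat.digitChar (m % 2)]
  decreasing_by exact Nat.div_lt_self (by omega) (by omega)

theorem pv_toDigitsCore_eq (fuel : Nat) : ∀ m acc, m < fuel →
    Nat.toDigitsCore 2 fuel m acc = pvBin m ++ acc := by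
  induction fuel with
  | zero => intro m acc h; omega
  | succ f ih =>
    intro m acc h
    rw [Nat.toDigitsCore]
    by_cases h2 : m / 2 = 0
    · have hm : m < 2 := by omega
      simp only [h2, if_true]
      rw [pvBin]
      simp [hm, Nat.mod_eq_of_lt hm]
    · simp only [h2, if_false]
      rw [ih (m / 2) _ (by omega)]
      have hm : ¬ m < 2 := by omega
      conv_rhs => rw [pvBin]
      simp [hm]

theorem pv_toBinChars_natCast (m : Nat) : PySem.Int.toBinChars (m : Int) = pvBin m := by
  have h : ¬ ((m : Int) < 0) := by omega
  simp only [PySem.Int.toBinChars, h, if_false, Int.toNat_natCast]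
  exact pv_toDigitsCore_eq (m + 1) m [] (by omega) |>.trans (by simp)

theorem pv_len_pvBin (N : Nat) : ∀ m, 0 < N → m < 2 ^ N → (pvBin m).length ≤ N := by
  induction N with
  | zero => omega
  | succ N ih =>
    intro m _ hm
    by_cases h2 : m < 2
    · rw [pvBin]; simp [h2]
    · rw [pvBin]; simp only [h2, if_false]
      have hN : 0 < N := by
        rcases Nat.eq_zero_or_pos N with h | h
        · subst h; simp at hm; omega
        · exact h
      have := ih (m / 2) hN (by
        have : 2 ^ (N + 1) = 2 ^ N * 2 := by ring
        omega)
      simp [List.length_append]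
      omega

theorem pv_mem_pvBin (m : Nat) : ∀ c ∈ pvBin m, c = '0' ∨ c = '1' := by
  induction m using Nat.strong_induction_on with
  | _ m ih =>
    intro c hc
    rw [pvBin] at hc
    by_cases h : m < 2
    · simp only [h, if_true] at hc
      interval_cases m <;> simp_all [Nat.digitChar]
    · simp only [h, if_false, List.mem_append, List.mem_singleton] at hc
      rcases hc with hc | hc
      · exact ih (m / 2) (Nat.div_lt_self (by omega) (by omega)) c hc
      · subst hc
        rcases Nat.mod_two_eq_zero_or_one m with h2 | h2 <;> rw [h2] <;> simp [Nat.digitChar]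

theorem pv_pvBin_ne_nil (m : Nat) : pvBin m ≠ [] := by
  rw [pvBin]
  by_cases h : m < 2 <;> simp [h]

theorem pv_zfill_pvBin (m w : Nat) :
    PySem.Chars.zfill (pvBin m) (w : Int) = List.replicate (w - (pvBin m).length) '0' ++ pvBin m := by
  rw [PySem.Chars.zfill.eq_def]
  by_cases h : (w : Int) ≤ ((pvBin m).length : Int)
  · have : w - (pvBin m).length = 0 := by omega
    simp [h, this]
  · simp only [h, if_false]
    rcases hcs : pvBin m with _ | ⟨c, rest⟩
    · exact absurd hcs (pv_pvBin_ne_nil m)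
    · have hc : c = '0' ∨ c = '1' := pv_mem_pvBin m c (by rw [hcs]; simp)
      have hns : ¬ (c = '+' ∨ c = '-') := by rcases hc with h' | h' <;> subst h' <;> decide
      simp only [hns, if_false]
      rw [Int.toNat_natCast]

-- zero-filled binary of m < 2^N lists the N low bits of m, MSB first
theorem pv_render' (N : Nat) : ∀ m, 0 < N → m < 2 ^ N →
    List.replicate (N - (pvBin m).length) '0' ++ pvBin m
      = ((List.range N).map (fun k => if m.testBit k then '1' else '0')).reverse := by
  induction N with
  | zero => omega
  | succ N ih =>
    intro m _ hm
    rcases Nat.eq_zero_or_pos N with hN | hN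
    · subst hN
      have h2 : m < 2 := by simpa using hm
      rw [pvBin]
      simp only [h2, if_true]
      interval_cases m <;> decide
    · by_cases hlt : m < 2 ^ N
      · have hbit : m.testBit N = false := Nat.testBit_lt_two_pow hlt
        have hlen : (pvBin m).length ≤ N := pv_len_pvBin N m hN hlt
        rw [List.range_succ, List.map_append, List.reverse_append]
        simp only [List.map_cons, List.map_nil, List.reverse_cons, List.reverse_nil,
          List.nil_append, hbit]
        rw [show N + 1 - (pvBin m).length = (N - (pvBin m).length) + 1 by omega,
          List.replicate_succ]
        rw [List.cons_append, ih m hN hlt]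
        rfl
      · have h2 : ¬ m < 2 := by
          have : (2:Nat) ≤ 2 ^ N := by
            calc (2:Nat) = 2 ^ 1 := rfl
            _ ≤ 2 ^ N := Nat.pow_le_pow_right (by omega) hN
          omega
        have hdiv : m / 2 < 2 ^ N := by
          have : 2 ^ (N + 1) = 2 ^ N * 2 := by ring
          omega
        conv_lhs => rw [pvBin]
        simp only [h2, if_false]
        have hlen2 : N + 1 - ((pvBin (m / 2)).length + 1) = N - (pvBin (m / 2)).length := by omega
        rw [List.length_append, List.length_singleton, hlen2, ← List.append_assoc]
        rw [ih (m / 2) hN hdiv]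
        rw [List.range_succ_eq_map, List.map_cons, List.reverse_cons, List.map_map]
        congr 1
        · congr 1
          apply List.map_congr_left
          intro k _
          simp only [Function.comp_apply, Nat.testBit_add_one]
        · rcases Nat.mod_two_eq_zero_or_one m with h3 | h3
          · have hb : m.testBit 0 = false := by
              rw [Nat.testBit_zero]
              simp [h3]
            simp [hb, h3, Nat.digitChar]
          · have hb : m.testBit 0 = true := by
              rw [Nat.testBit_zero]
              simp [h3]
            simp [hb, h3, Nat.digitChar]

-- one row of A equals one row of B, for arbitrary integers a b and 0 < n
theorem pv_row (n : Int) (a b : Int) (hn : 0 < n) :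
    ((PySem.List.pyRange 0 n 1).map (fun j =>
        if PySem.Int.bor (PySem.Int.band a ((1 : Int) <<< j.toNat))
             (PySem.Int.band b ((1 : Int) <<< j.toNat)) ≠ 0 then '#' else ' ')).reverse
    = (PySem.Chars.zfill
        (PySem.Int.toBinChars (PySem.Int.band (PySem.Int.bor a b) (((1 : Int) <<< n.toNat) - 1)))
        n).map pyTrans := by
  simp only [Int.shiftLeft_natCast_right]
  set N := n.toNat with hN
  have hn' : n = (N : Int) := by omega
  have hNpos : 0 < N := by omega
  obtain ⟨m, hm, hmlt, hbits⟩ := pv_row_mask a b N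
  rw [hm, pv_toBinChars_natCast, hn', pv_zfill_pvBin, pv_render' N m hNpos hmlt]
  rw [List.map_reverse, List.map_map]
  rw [PySem.List.pyRange_one]
  simp only [Int.sub_zero, Int.toNat_natCast, List.map_map]
  congr 1
  apply List.map_congr_left
  intro k hk
  have hk' : k < N := List.mem_range.mp hk
  simp only [Function.comp_apply]
  have ht : ((0 : Int) + (k : Int)).toNat = k := by omega
  rw [ht]
  by_cases hc : (a.testBit k || b.testBit k) = true
  · rw [if_pos ((pv_cond_iff a b k).mpr hc)]
    rw [hbits k hk', hc]
    rfl
  · rw [if_neg (fun h => hc ((pv_cond_iff a b k).mp h))]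
    rw [hbits k hk']
    simp only [Bool.not_eq_true] at hc
    rw [hc]
    rfl

-- ===== VERDICT (by name: the statement is the Claim_ definition above) =====
theorem solution_spec : Claim_equal_solution := by
  intro n arr1 arr2 _ _
  unfold Spec_solution solution solution_alt
  rw [pv_foldl_append_map, pv_foldl_append_map]
  simp only [List.nil_append]
  apply List.map_congr_left
  intro i hi
  have hn : 0 < n := by
    have := (PySem.List.mem_pyRange_one).mp hi
    omega
  show String.ofList _ = String.ofList _
  congr 1
  rw [pv_foldl_if]
  simp only [List.nil_append]
  exact pv_row n (PySem.List.pyGetD arr1 i 0) (PySem.List.pyGetD arr2 i 0) hn
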